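-- pv_equiv track=rewrite | github.com/FabriceBoyer/AOC | 2023/day_13/part2.py | get_vsymetry_index
-- ===== SOURCE A (Python) =====
-- def get_vsymetry_index(_pattern: list[str], rejected: int) -> int:  # -1 means not found
--     col_count = len(_pattern[0])
--     for r_index in range(1, col_count):  # reflection index
--         if r_index == rejected:
--             continue
--         vreflect_ok = True
--         for line in _pattern:
--             size = min(r_index, col_count - r_index)
--             left = line[r_index - size : r_index]
--             right = line[r_index : r_index + size]
--             if left != right[::-1]:  # compare to reverse right
--                 vreflect_ok = False
--                 break
--         if vreflect_ok:
--             return r_index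
--     return -1
-- ===== SOURCE B (Python) =====
-- def mirrors(line, r, w):
--     size = min(r, w - r)
--     return line[r - size:r] == line[r:r + size][::-1]
--
--
-- def get_vsymetry_index(_pattern: list[str], rejected: int) -> int:  # -1 means not found
--     w = len(_pattern[0])
--     survivors = [r for r in range(1, w) if r != rejected]
--     for line in _pattern:
--         survivors = [r for r in survivors if mirrors(line, r, w)]
--         if not survivors:
--             return -1
--     return survivors[0] if survivors else -1
-- ===== Notes on version B (the rewrite author's own statement) =====
-- stated objective: alternative
-- what changed: B inverts the loop nesting: it keeps a survivor list of candidate reflection columns and filters it line by line (intersecting per-line valid-boundary sets, with early exit when none survive), returning the minimum survivor at the end, instead of A's per-candidate rescan of all lines with first-match return.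
import Mathlib
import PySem

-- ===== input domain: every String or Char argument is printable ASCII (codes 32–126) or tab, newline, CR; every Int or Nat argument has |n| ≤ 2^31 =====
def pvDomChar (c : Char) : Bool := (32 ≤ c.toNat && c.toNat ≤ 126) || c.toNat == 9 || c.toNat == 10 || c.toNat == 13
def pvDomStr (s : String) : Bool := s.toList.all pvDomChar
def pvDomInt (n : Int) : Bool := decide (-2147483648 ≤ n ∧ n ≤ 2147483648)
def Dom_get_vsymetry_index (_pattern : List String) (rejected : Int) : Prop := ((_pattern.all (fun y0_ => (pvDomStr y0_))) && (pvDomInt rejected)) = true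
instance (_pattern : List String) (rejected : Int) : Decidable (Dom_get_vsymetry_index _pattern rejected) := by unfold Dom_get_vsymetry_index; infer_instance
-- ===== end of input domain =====

-- ===== PORT A =====
-- B changes the traversal: a survivor set of candidate columns filtered line by line instead of A's per-candidate scan (objective: alternative; return value only).
-- Inner test of A: left = line[r-size:r], right = line[r:r+size], compare left to right[::-1]
def pvA_check (line : List Char) (r cc : Int) : Bool :=
  let size := min r (cc - r)
  let left := PySem.List.slice line (some (r - size)) (some r)
  let right := PySem.List.slice line (some r) (some (r + size))
  decide (left = (PySem.List.slice? right none none (-1)).getD [])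

-- A's inner 'for line in _pattern' with break on first mismatch
def pvA_lines (pattern : List String) (r cc : Int) : Bool :=
  match pattern with
  | [] => true
  | line :: rest => if !(pvA_check line.toList r cc) then false else pvA_lines rest r cc

-- A's outer 'for r_index in range(1, col_count)' with continue/return
def pvA_scan (pattern : List String) (rejected cc : Int) : List Int → Int
  | [] => -1
  | r :: rs =>
      if r = rejected then pvA_scan pattern rejected cc rs
      else if pvA_lines pattern r cc then r else pvA_scan pattern rejected cc rs

def get_vsymetry_index (_pattern : List String) (rejected : Int) : Int :=
  let col_count : Int := ((PySem.List.pyGet? _pattern 0).getD "").toList.length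
  pvA_scan _pattern rejected col_count (PySem.List.pyRange 1 col_count 1)

-- ===== PORT B =====
def pvB_mirrors (line : List Char) (r w : Int) : Bool :=
  let size := min r (w - r)
  decide (PySem.List.slice line (some (r - size)) (some r)
    = (PySem.List.slice? (PySem.List.slice line (some r) (some (r + size))) none none (-1)).getD [])

-- B's 'for line in _pattern' filtering the survivor list, early exit when empty
def pvB_loop (w : Int) (s : List Int) : List String → Int
  | [] => match s with | [] => -1 | r :: _ => r
  | line :: rest =>
      let s' := s.filter (fun r => pvB_mirrors line.toList r w)
      if s' = [] then -1 else pvB_loop w s' rest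

def get_vsymetry_index_alt (_pattern : List String) (rejected : Int) : Int :=
  let w : Int := ((PySem.List.pyGet? _pattern 0).getD "").toList.length
  pvB_loop w ((PySem.List.pyRange 1 w 1).filter (fun r => r != rejected)) _pattern

-- ===== PRECONDITION & SPEC =====
-- Pre_ excludes only the empty pattern, on which A raises IndexError at _pattern[0] (B raises there too).
def Pre_get_vsymetry_index (_pattern : List String) (rejected : Int) : Prop := _pattern ≠ []
instance (_pattern : List String) (rejected : Int) : Decidable (Pre_get_vsymetry_index _pattern rejected) := by unfold Pre_get_vsymetry_index; infer_instance
def pvWitness_get_vsymetry_index : List String × Int := (["#..#", ".##."], 0)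

def Spec_get_vsymetry_index (_pattern : List String) (rejected : Int) (out : Int) : Prop := out = get_vsymetry_index_alt _pattern rejected
instance (_pattern : List String) (rejected : Int) (out : Int) : Decidable (Spec_get_vsymetry_index _pattern rejected out) := by unfold Spec_get_vsymetry_index; infer_instance

-- ===== CLAIM (what is proved, stated in full; the proofs are below) =====
def Claim_equal_get_vsymetry_index : Prop := ∀ (_pattern : List String) (rejected : Int), Dom_get_vsymetry_index _pattern rejected → Pre_get_vsymetry_index _pattern rejected → Spec_get_vsymetry_index _pattern rejected (get_vsymetry_index _pattern rejected)

-- ===== LEMMAS AND PROOFS =====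
-- A's inner loop is an 'all' over the lines
theorem pvA_check_eq_mirrors (l : List Char) (r cc : Int) : pvA_check l r cc = pvB_mirrors l r cc := rfl

theorem pvA_lines_eq_all (pattern : List String) (r cc : Int) :
    pvA_lines pattern r cc = pattern.all (fun line => pvB_mirrors line.toList r cc) := by
  induction pattern with
  | nil => rfl
  | cons line rest ih =>
      show (if !(pvA_check line.toList r cc) then false else pvA_lines rest r cc) = _
      rw [pvA_check_eq_mirrors]
      cases hb : pvB_mirrors line.toList r cc <;> simp [hb, ih, List.all_cons]

-- A's outer loop returns the head of the filtered candidate list (or -1)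
theorem pvA_scan_eq (pattern : List String) (rejected cc : Int) (rs : List Int) :
    pvA_scan pattern rejected cc rs
      = ((rs.filter (fun r => (r != rejected) && pvA_lines pattern r cc)).headD (-1)) := by
  induction rs with
  | nil => rfl
  | cons r rest ih =>
      show (if r = rejected then _ else if pvA_lines pattern r cc then r else _) = _
      by_cases h : r = rejected
      · simp [h, ih]
      · by_cases h2 : pvA_lines pattern r cc = true
        · simp [h, h2]
        · simp only [Bool.not_eq_true] at h2
          simp [h, h2, ih]

-- B's loop returns the head of the survivors that pass every line (or -1)
theorem pvB_loop_eq (w : Int) (lines : List String) (s : List Int) :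
    pvB_loop w s lines
      = ((s.filter (fun r => lines.all (fun line => pvB_mirrors line.toList r w))).headD (-1)) := by
  induction lines generalizing s with
  | nil =>
      simp only [List.all_nil, List.filter_true]
      cases s <;> rfl
  | cons line rest ih =>
      show (if s.filter (fun r => pvB_mirrors line.toList r w) = [] then -1
            else pvB_loop w (s.filter (fun r => pvB_mirrors line.toList r w)) rest) = _
      have hff : s.filter (fun r => rest.all (fun line => pvB_mirrors line.toList r w) && pvB_mirrors line.toList r w)
          = (s.filter (fun r => pvB_mirrors line.toList r w)).filter (fun r => rest.all (fun line => pvB_mirrors line.toList r w)) := by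
        rw [List.filter_filter]
      have hco : s.filter (fun r => (line :: rest).all (fun l => pvB_mirrors l.toList r w))
          = (s.filter (fun r => pvB_mirrors line.toList r w)).filter (fun r => rest.all (fun l => pvB_mirrors l.toList r w)) := by
        rw [← hff]
        apply List.filter_congr
        intro r _
        simp [List.all_cons, Bool.and_comm]
      rw [hco]
      by_cases h : s.filter (fun r => pvB_mirrors line.toList r w) = []
      · simp [h]
      · simp [h, ih]

theorem get_vsymetry_index_spec : Claim_equal_get_vsymetry_index := by
  intro pat rejected _ _
  show get_vsymetry_index pat rejected = get_vsymetry_index_alt pat rejected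
  unfold get_vsymetry_index get_vsymetry_index_alt
  rw [pvA_scan_eq, pvB_loop_eq, List.filter_filter]
  congr 1
  apply List.filter_congr
  intro r _
  rw [pvA_lines_eq_all]
  exact Bool.and_comm _ _
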